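-- pv_equiv track=rewrite | github.com/Junliang-liu-kit/Bili_to_MD | src/get_subtitle.py | _select_subtitles
-- ===== SOURCE A (Python) =====
-- from typing import List, Dict, Union, Optional
--
-- def _select_subtitles(subtitles: List[Dict]) -> List[Dict]:
--     """
--     根据优先级选择字幕
--
--     Args:
--         subtitles: 字幕列表
--
--     Returns:
--         选中的字幕列表
--     """
--     # 优先检查原声字幕（非ai开头）
--     original_subtitles = [
--         sub for sub in subtitles
--         if sub.get('lan', '') and not sub.get('lan', '').startswith('ai-')
--     ]
--
--     if original_subtitles:
--         return original_subtitles
--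
--     # 如果没有原声字幕，检查ai-zh字幕
--     ai_zh_subtitles = [
--         sub for sub in subtitles
--         if sub.get('lan', '') == 'ai-zh'
--     ]
--
--     if ai_zh_subtitles:
--         return ai_zh_subtitles
--
--     # 如果都没有，返回空列表（表示错误）
--     return []
-- ===== SOURCE B (Python) =====
-- from typing import List, Dict
--
-- def _rank(sub: Dict) -> int:
--     lan = sub.get('lan', '')
--     if lan and not lan.startswith('ai-'):
--         return 0
--     if lan == 'ai-zh':
--         return 1
--     return 2
--
-- def _select_subtitles(subtitles: List[Dict]) -> List[Dict]:
--     best = min(map(_rank, subtitles), default=2)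
--     if best == 2:
--         return []
--     return [sub for sub in subtitles if _rank(sub) == best]
-- ===== Notes on version B (the rewrite author's own statement) =====
-- stated objective: alternative
-- what changed: Instead of A's staged filter-then-fallback passes, B assigns each subtitle a priority rank (0 original, 1 ai-zh, 2 other), takes the minimum rank over the list, and returns the subtitles of that rank (or [] when the minimum is 2).
import Mathlib
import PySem

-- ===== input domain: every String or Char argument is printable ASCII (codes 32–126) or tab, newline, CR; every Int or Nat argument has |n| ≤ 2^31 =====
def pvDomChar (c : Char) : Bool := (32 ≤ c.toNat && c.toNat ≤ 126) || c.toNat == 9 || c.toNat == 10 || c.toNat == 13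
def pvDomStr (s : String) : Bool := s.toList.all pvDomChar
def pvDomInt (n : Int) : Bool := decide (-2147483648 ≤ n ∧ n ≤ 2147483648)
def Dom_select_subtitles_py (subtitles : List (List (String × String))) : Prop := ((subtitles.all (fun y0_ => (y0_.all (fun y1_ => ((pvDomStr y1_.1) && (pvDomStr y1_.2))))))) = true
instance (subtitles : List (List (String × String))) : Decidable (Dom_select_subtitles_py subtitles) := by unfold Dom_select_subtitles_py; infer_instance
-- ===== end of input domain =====

-- B replaces A's staged filter-with-fallback by a min-priority-rank selection; objective: alternative algorithm, same result.

-- ===== PORT A =====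
-- sub.get('lan', '')
def pvLan (sub : List (String × String)) : String := PySem.Dict.getD (PySem.Dict.mk sub) "lan" ""

def select_subtitles_py (subtitles : List (List (String × String))) : List (List (String × String)) :=
  let original_subtitles := subtitles.filter
    (fun sub => pvLan sub ≠ "" && !(PySem.Str.startswith (pvLan sub) "ai-"))
  if original_subtitles ≠ [] then original_subtitles
  else
    let ai_zh_subtitles := subtitles.filter (fun sub => pvLan sub == "ai-zh")
    if ai_zh_subtitles ≠ [] then ai_zh_subtitles
    else []

-- ===== PORT B =====
-- _rank(sub): priority class of one subtitle entry
def pvRank (sub : List (String × String)) : Nat :=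
  let lan := PySem.Dict.getD (PySem.Dict.mk sub) "lan" ""
  if lan ≠ "" && !(PySem.Str.startswith lan "ai-") then 0
  else if lan == "ai-zh" then 1
  else 2

-- min(map(_rank, subtitles), default=2); then one filter by that rank
def select_subtitles_py_alt (subtitles : List (List (String × String))) : List (List (String × String)) :=
  let best := match PySem.List.min? (subtitles.map pvRank) (fun x => x) with
    | none => 2
    | some m => m
  if best == 2 then []
  else subtitles.filter (fun sub => pvRank sub == best)

-- ===== PRECONDITION & SPEC =====
def Spec_select_subtitles_py (subtitles : List (List (String × String))) (out : List (List (String × String))) : Prop := out = select_subtitles_py_alt subtitles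
instance (subtitles : List (List (String × String))) (out : List (List (String × String))) : Decidable (Spec_select_subtitles_py subtitles out) := by unfold Spec_select_subtitles_py; infer_instance

-- ===== CLAIM (what is proved, stated in full; the proofs are below) =====
def Claim_equal_select_subtitles_py : Prop := ∀ (subtitles : List (List (String × String))), Dom_select_subtitles_py subtitles → Spec_select_subtitles_py subtitles (select_subtitles_py subtitles)

-- ===== LEMMAS AND PROOFS =====

theorem pvRank_eq_zero_iff (s : List (String × String)) :
    pvRank s = 0 ↔ (pvLan s ≠ "" && !(PySem.Str.startswith (pvLan s) "ai-")) = true := by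
  simp only [pvRank, pvLan]
  split_ifs with h1 h2 <;> simp_all

theorem pvRank_eq_one_iff (s : List (String × String)) :
    pvRank s = 1 ↔ (pvLan s == "ai-zh") = true := by
  simp only [pvRank, pvLan]
  split_ifs with h1 h2 <;> simp_all
  · -- h1 : lan nonempty and does not start with "ai-"; but lan = "ai-zh" does
    intro h
    rw [h] at h1
    revert h1
    decide

theorem pvRank_beq_zero (s : List (String × String)) :
    (pvRank s == 0) = (pvLan s ≠ "" && !(PySem.Str.startswith (pvLan s) "ai-")) := by
  simp only [pvRank, pvLan]
  split_ifs with h1 h2 <;> simp_all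

theorem pvRank_beq_one (s : List (String × String)) :
    (pvRank s == 1) = (pvLan s == "ai-zh") := by
  simp only [pvRank, pvLan]
  split_ifs with h1 h2 <;> simp_all
  intro h
  rw [h] at h1
  revert h1
  decide

theorem select_subtitles_py_eq (subtitles : List (List (String × String))) :
    select_subtitles_py subtitles = select_subtitles_py_alt subtitles := by
  by_cases h0 : subtitles.filter
      (fun sub => pvLan sub ≠ "" && !(PySem.Str.startswith (pvLan sub) "ai-")) = []
  · by_cases h1 : subtitles.filter (fun sub => pvLan sub == "ai-zh") = []
    · -- every rank is 2: both sides return []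
      have hall : ∀ s ∈ subtitles, pvRank s = 2 := by
        intro s hs
        have hn0 : ¬ (pvLan s ≠ "" && !(PySem.Str.startswith (pvLan s) "ai-")) = true := by
          intro hc
          exact (List.filter_eq_nil_iff.mp h0) s hs hc
        have hn1 : ¬ (pvLan s == "ai-zh") = true := by
          intro hc
          exact (List.filter_eq_nil_iff.mp h1) s hs hc
        simp only [pvRank]
        simp only [pvLan] at hn0 hn1
        split_ifs with hA
        · exact absurd hA hn0
        · rfl
      have hbest : (match PySem.List.min? (subtitles.map pvRank) (fun x => x) with
          | none => 2 | some m => m) = 2 := by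
        cases hm : PySem.List.min? (subtitles.map pvRank) (fun x => x) with
        | none => rfl
        | some m =>
          have := PySem.List.min?_mem hm
          simp only [List.mem_map] at this
          obtain ⟨s, hs, hr⟩ := this
          simp [← hr, hall s hs]
      simp only [select_subtitles_py, select_subtitles_py_alt, h0, h1, hbest]
      simp
    · -- no rank 0, some rank 1: best = 1, both return the ai-zh filter
      have hn0 : ∀ s ∈ subtitles, pvRank s ≠ 0 := by
        intro s hs hc
        exact (List.filter_eq_nil_iff.mp h0) s hs ((pvRank_eq_zero_iff s).mp hc)
      rw [List.filter_eq_nil_iff] at h1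
      push Not at h1
      obtain ⟨s1, hs1, hp1⟩ := h1
      have h1 : ¬ subtitles.filter (fun sub => pvLan sub == "ai-zh") = [] := by
        rw [List.filter_eq_nil_iff]; push Not; exact ⟨s1, hs1, hp1⟩
      have hr1 : pvRank s1 = 1 := (pvRank_eq_one_iff s1).mpr hp1
      have hbest : (match PySem.List.min? (subtitles.map pvRank) (fun x => x) with
          | none => 2 | some m => m) = 1 := by
        cases hm : PySem.List.min? (subtitles.map pvRank) (fun x => x) with
        | none =>
          rw [PySem.List.min?_eq_none_iff] at hm
          simp only [List.map_eq_nil_iff] at hm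
          rw [hm] at hs1
          exact absurd hs1 (List.not_mem_nil)
        | some m =>
          have hmem := PySem.List.min?_mem hm
          simp only [List.mem_map] at hmem
          obtain ⟨s', hs', hr'⟩ := hmem
          have hle : m ≤ 1 := by
            have := PySem.List.min?_isMin hm (pvRank s1) (List.mem_map_of_mem hs1)
            simpa [hr1] using this
          have hne : m ≠ 0 := by
            rw [← hr']
            exact hn0 s' hs'
          show m = 1
          omega
      simp only [select_subtitles_py, select_subtitles_py_alt, h0, h1, hbest]
      simp only [ite_not, if_neg (by decide : ¬ ((1 : Nat) == 2) = true)]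
      simp only [if_neg h1]
      exact (List.filter_congr fun s _ => pvRank_beq_one s).symm
  · -- some rank 0: best = 0, both return the original filter
    rw [List.filter_eq_nil_iff] at h0
    push Not at h0
    obtain ⟨s0, hs0, hp0⟩ := h0
    have h0 : ¬ subtitles.filter
        (fun sub => pvLan sub ≠ "" && !(PySem.Str.startswith (pvLan sub) "ai-")) = [] := by
      rw [List.filter_eq_nil_iff]; push Not; exact ⟨s0, hs0, hp0⟩
    have hr0 : pvRank s0 = 0 := (pvRank_eq_zero_iff s0).mpr hp0
    have hbest : (match PySem.List.min? (subtitles.map pvRank) (fun x => x) with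
        | none => 2 | some m => m) = 0 := by
      cases hm : PySem.List.min? (subtitles.map pvRank) (fun x => x) with
      | none =>
        rw [PySem.List.min?_eq_none_iff] at hm
        simp only [List.map_eq_nil_iff] at hm
        rw [hm] at hs0
        exact absurd hs0 (List.not_mem_nil)
      | some m =>
        have := PySem.List.min?_isMin hm (pvRank s0) (List.mem_map_of_mem hs0)
        simp only [hr0] at this
        show m = 0
        omega
    simp only [select_subtitles_py, select_subtitles_py_alt, hbest]
    simp only [if_pos h0, if_neg (by decide : ¬ ((0 : Nat) == 2) = true)]
    exact (List.filter_congr fun s _ => pvRank_beq_zero s).symm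

-- ===== VERDICT (by name: the statement is the Claim_ definition above) =====
theorem select_subtitles_py_spec : Claim_equal_select_subtitles_py := by
  intro subtitles _
  unfold Spec_select_subtitles_py
  exact select_subtitles_py_eq subtitles
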